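-- pv_equiv track=rewrite | github.com/daniel347x/workflowy-mcp-fixed | beacon_obtain_code_snippet.py | _python_comment_block_span
-- ===== SOURCE A (Python) =====
-- from typing import Dict, Iterable, List, Optional, Tuple
--
-- def _python_comment_block_span(
--     lines: List[str],
--     comment_line: int,
-- ) -> Optional[Tuple[int, int]]:
--     """Return (top, bottom) of the Python comment block around a beacon.
--
--     Semantics are aligned with nexus_map_codebase._extract_python_beacon_context:
--     - Start from the beacon's comment_line.
--     - Find the end of the @beacon[...] metadata block (first line containing ']').
--     - ABOVE: walk upward, skipping blanks, collecting contiguous '#' comment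
--       lines (excluding the metadata itself).
--     - BELOW: from the end of the metadata block, walk downward, skipping
--       blanks, collecting contiguous '#' comment lines.
--
--     Returns None if no such non-empty comment lines are found.
--     """
--
--     n = len(lines)
--     if comment_line <= 0 or comment_line > n:
--         return None
--
--     # Determine end of the beacon metadata block
--     j = int(comment_line)
--     block_end = comment_line
--     while j <= n:
--         raw = lines[j - 1].lstrip()
--         if raw.startswith("#"):
--             body = raw.lstrip("#").lstrip()
--         else:
--             body = raw
--         if "]" in body:
--             block_end = j
--             break
--         j += 1
--
--     top: Optional[int] = None
--     bottom: Optional[int] = None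
--
--     # ABOVE
--     j = comment_line - 1
--     while j >= 1:
--         stripped = lines[j - 1].lstrip()
--         if not stripped:
--             j -= 1
--             continue
--         if stripped.startswith("#"):
--             body = stripped.lstrip("#").lstrip()
--             if body:
--                 if top is None:
--                     top = j
--                     bottom = j
--                 else:
--                     top = j
--                 j -= 1
--                 continue
--         break
--
--     # BELOW
--     j = block_end + 1
--     while j <= n:
--         stripped = lines[j - 1].lstrip()
--         if not stripped:
--             j += 1
--             continue
--         if stripped.startswith("#"):
--             body = stripped.lstrip("#").lstrip()
--             if body:
--                 if top is None:
--                     top = j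
--                     bottom = j
--                 else:
--                     bottom = j
--                 j += 1
--                 continue
--         break
--
--     if top is None:
--         return None
--     if bottom is None:
--         bottom = top
--     return top, bottom
-- ===== SOURCE B (Python) =====
-- from typing import List, Optional, Tuple
--
--
-- def _python_comment_block_span(
--     lines: List[str],
--     comment_line: int,
-- ) -> Optional[Tuple[int, int]]:
--     """Boundary-arithmetic rewrite: classify lines, compute the stop boundaries of the
--     blank-or-comment region above and below directly (max/min of non-passable indices),
--     then filter the comment lines inside those half-open windows."""
--     n = len(lines)
--     if comment_line <= 0 or comment_line > n:
--         return None
--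
--     def stripped(j: int) -> str:
--         return lines[j - 1].lstrip()
--
--     def is_comment(j: int) -> bool:
--         s = stripped(j)
--         return s.startswith("#") and bool(s.lstrip("#").lstrip())
--
--     def passable(j: int) -> bool:
--         return not stripped(j) or is_comment(j)
--
--     def body(j: int) -> str:
--         s = stripped(j)
--         return s.lstrip("#").lstrip() if s.startswith("#") else s
--
--     block_end = next((j for j in range(comment_line, n + 1) if "]" in body(j)),
--                      comment_line)
--     up_stop = max((j for j in range(1, comment_line) if not passable(j)), default=0)
--     down_stop = min((j for j in range(block_end + 1, n + 1) if not passable(j)),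
--                     default=n + 1)
--     idxs = [j for j in range(up_stop + 1, comment_line) if is_comment(j)] \
--         + [j for j in range(block_end + 1, down_stop) if is_comment(j)]
--     if not idxs:
--         return None
--     return (min(idxs), max(idxs))
-- ===== Notes on version B (the rewrite author's own statement) =====
-- stated objective: alternative
-- what changed: A's two stateful up/down walks are replaced by boundary arithmetic: classify each line once, compute the stop boundary of each blank-or-comment region directly as max/min of non-passable line indices over a range, then filter the comment lines inside the two resulting half-open windows and take min/max.
import Mathlib
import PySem

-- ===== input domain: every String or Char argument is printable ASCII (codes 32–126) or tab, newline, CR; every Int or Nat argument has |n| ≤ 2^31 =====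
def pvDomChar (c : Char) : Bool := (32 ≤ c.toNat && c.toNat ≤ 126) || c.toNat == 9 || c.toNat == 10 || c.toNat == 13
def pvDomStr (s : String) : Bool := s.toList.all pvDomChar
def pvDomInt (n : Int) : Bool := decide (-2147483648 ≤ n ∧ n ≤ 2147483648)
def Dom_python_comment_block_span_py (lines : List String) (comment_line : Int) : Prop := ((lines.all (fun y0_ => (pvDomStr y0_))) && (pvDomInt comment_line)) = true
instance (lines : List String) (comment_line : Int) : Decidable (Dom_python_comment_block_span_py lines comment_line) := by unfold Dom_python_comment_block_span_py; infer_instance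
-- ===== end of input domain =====

-- B replaces A's two stateful up/down walks by boundary arithmetic: the stop boundary of each
-- blank-or-comment region is computed directly as max/min of the non-passable line indices over a
-- range, and the span is min/max of the comment lines filtered from the two windows (objective:
-- alternative). A's while loops are ported with a Nat fuel argument as a pure totality guard: the
-- caller passes fuel equal to the loop's maximal iteration count, so each loop always exits
-- through its own Python condition, never through fuel exhaustion.

-- shared per-line expressions both Pythons evaluate verbatim:
-- s.lstrip("#") — drop leading '#' characters (exact: the strip set is the single char '#')
def pvLstripHash (s : String) : String := String.ofList (s.toList.dropWhile (· == '#'))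
-- lines[j - 1].lstrip()  (index always in range at every call site; getD "" is a totality guard)
def pvLineStripped (lines : List String) (j : Int) : String :=
  PySem.Str.lstrip ((PySem.List.pyGet? lines (j - 1)).getD "")
-- stripped.startswith("#") and stripped.lstrip("#").lstrip() is non-empty
def pvLineIsComment (lines : List String) (j : Int) : Bool :=
  PySem.Str.startswith (pvLineStripped lines j) "#" &&
    (PySem.Str.lstrip (pvLstripHash (pvLineStripped lines j)) != "")

-- ===== PORT A =====
-- A's metadata-end while loop: first j in [j, n] whose '#'-stripped body contains ']' (none if no break)
def aFindEnd (lines : List String) (n : Int) : Nat → Int → Option Int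
  | 0, _ => none
  | k + 1, j =>
    if j ≤ n then
      let raw := pvLineStripped lines j
      let body := if PySem.Str.startswith raw "#" then PySem.Str.lstrip (pvLstripHash raw) else raw
      if PySem.Str.isIn "]" body then some j else aFindEnd lines n k (j + 1)
    else none

-- A's ABOVE while loop, carrying the (top, bottom) state
def aAbove (lines : List String) : Nat → Int → Option Int → Option Int → Option Int × Option Int
  | 0, _, top, bottom => (top, bottom)
  | k + 1, j, top, bottom =>
    if 1 ≤ j then
      if pvLineStripped lines j = "" then aAbove lines k (j - 1) top bottom
      else if pvLineIsComment lines j then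
        match top with
        | none => aAbove lines k (j - 1) (some j) (some j)
        | some _ => aAbove lines k (j - 1) (some j) bottom
      else (top, bottom)
    else (top, bottom)

-- A's BELOW while loop, carrying the (top, bottom) state
def aBelow (lines : List String) (n : Int) : Nat → Int → Option Int → Option Int → Option Int × Option Int
  | 0, _, top, bottom => (top, bottom)
  | k + 1, j, top, bottom =>
    if j ≤ n then
      if pvLineStripped lines j = "" then aBelow lines n k (j + 1) top bottom
      else if pvLineIsComment lines j then
        match top with
        | none => aBelow lines n k (j + 1) (some j) (some j)
        | some _ => aBelow lines n k (j + 1) top (some j)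
      else (top, bottom)
    else (top, bottom)

def python_comment_block_span_py (lines : List String) (comment_line : Int) : Option (Int × Int) :=
  let n : Int := lines.length
  if comment_line ≤ 0 ∨ n < comment_line then none
  else
    let block_end : Int := (aFindEnd lines n (n + 1 - comment_line).toNat comment_line).getD comment_line
    let p1 := aAbove lines (comment_line - 1).toNat (comment_line - 1) none none
    let p2 := aBelow lines n (n + 1 - (block_end + 1)).toNat (block_end + 1) p1.1 p1.2
    match p2.1 with
    | none => none
    | some t => some (t, p2.2.getD t)

-- ===== PORT B =====
-- body(j): the '#'-stripped body of line j
def pvBody (lines : List String) (j : Int) : String :=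
  let s := pvLineStripped lines j
  if PySem.Str.startswith s "#" then PySem.Str.lstrip (pvLstripHash s) else s
-- passable(j): blank line or non-empty '#' comment
def pvPassable (lines : List String) (j : Int) : Bool :=
  (pvLineStripped lines j == "") || pvLineIsComment lines j

def python_comment_block_span_py_alt (lines : List String) (comment_line : Int) : Option (Int × Int) :=
  let n : Int := lines.length
  if comment_line ≤ 0 ∨ n < comment_line then none
  else
    -- next((j for j in range(comment_line, n+1) if "]" in body(j)), comment_line)
    let block_end : Int :=
      ((PySem.List.pyRange comment_line (n + 1) 1).find?
        (fun j => PySem.Str.isIn "]" (pvBody lines j))).getD comment_line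
    -- max((j for j in range(1, comment_line) if not passable(j)), default=0)
    let up_stop : Int :=
      (PySem.List.max? ((PySem.List.pyRange 1 comment_line 1).filter
        (fun j => !pvPassable lines j)) (fun x => x)).getD 0
    -- min((j for j in range(block_end+1, n+1) if not passable(j)), default=n+1)
    let down_stop : Int :=
      (PySem.List.min? ((PySem.List.pyRange (block_end + 1) (n + 1) 1).filter
        (fun j => !pvPassable lines j)) (fun x => x)).getD (n + 1)
    let idxs : List Int :=
      (PySem.List.pyRange (up_stop + 1) comment_line 1).filter (fun j => pvLineIsComment lines j)
        ++ (PySem.List.pyRange (block_end + 1) down_stop 1).filter (fun j => pvLineIsComment lines j)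
    match PySem.List.min? idxs (fun x => x), PySem.List.max? idxs (fun x => x) with
    | some lo, some hi => some (lo, hi)
    | _, _ => none

-- ===== PRECONDITION & SPEC =====
def Spec_python_comment_block_span_py (lines : List String) (comment_line : Int) (out : Option (Int × Int)) : Prop := out = python_comment_block_span_py_alt lines comment_line
instance (lines : List String) (comment_line : Int) (out : Option (Int × Int)) : Decidable (Spec_python_comment_block_span_py lines comment_line out) := by unfold Spec_python_comment_block_span_py; infer_instance

-- ===== CLAIM (what is proved, stated in full; the proofs are below) =====
def Claim_equal_python_comment_block_span_py : Prop := ∀ (lines : List String) (comment_line : Int), Dom_python_comment_block_span_py lines comment_line → Spec_python_comment_block_span_py lines comment_line (python_comment_block_span_py lines comment_line)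

-- ===== LEMMAS AND PROOFS =====

-- proof-only helpers: the lists of indices A's ABOVE/BELOW walks collect
def wUp (lines : List String) (n : Int) : Nat → Int → List Int
  | 0, _ => []
  | k + 1, j =>
    if 1 ≤ j ∧ j ≤ n then
      if pvLineStripped lines j = "" then wUp lines n k (j - 1)
      else if pvLineIsComment lines j then j :: wUp lines n k (j - 1)
      else []
    else []

def wDown (lines : List String) (n : Int) : Nat → Int → List Int
  | 0, _ => []
  | k + 1, j =>
    if 1 ≤ j ∧ j ≤ n then
      if pvLineStripped lines j = "" then wDown lines n k (j + 1)
      else if pvLineIsComment lines j then j :: wDown lines n k (j + 1)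
      else []
    else []

-- proof-only: A's answer re-expressed as min/max over the walk-collected lists
def walkSpan (lines : List String) (comment_line : Int) : Option (Int × Int) :=
  let n : Int := lines.length
  if comment_line ≤ 0 ∨ n < comment_line then none
  else
    let block_end : Int := (aFindEnd lines n (n + 1 - comment_line).toNat comment_line).getD comment_line
    let idxs : List Int := wUp lines n (comment_line - 1).toNat (comment_line - 1) ++
      wDown lines n (n + 1 - (block_end + 1)).toNat (block_end + 1)
    match PySem.List.min? idxs (fun x => x), PySem.List.max? idxs (fun x => x) with
    | some lo, some hi => some (lo, hi)
    | _, _ => none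

theorem findEnd_ge (lines : List String) (n : Int) (k : Nat) (j r : Int)
    (h : aFindEnd lines n k j = some r) : j ≤ r := by
  induction k generalizing j with
  | zero => exact absurd h (by simp [aFindEnd])
  | succ k ih =>
    rw [aFindEnd] at h
    by_cases hj : j ≤ n
    · rw [if_pos hj] at h
      by_cases hIn : PySem.Str.isIn "]" (if PySem.Str.startswith (pvLineStripped lines j) "#" then PySem.Str.lstrip (pvLstripHash (pvLineStripped lines j)) else pvLineStripped lines j) = true
      · rw [if_pos hIn] at h
        cases h; omega
      · rw [if_neg hIn] at h
        have := ih (j + 1) h; omega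
    · rw [if_neg hj] at h; cases h

theorem lastD_cons (a t : Int) (l : List Int) : ((a :: l).getLast?).getD t = (l.getLast?).getD a := by
  cases l with
  | nil => rfl
  | cons b l =>
    simp only [List.getLast?_cons_cons]
    rcases h : (b :: l).getLast? with _ | v
    · exact absurd h (by simp)
    · rfl

theorem lastD_mem (x : Int) (xs : List Int) : ((xs.getLast?).getD x) ∈ x :: xs := by
  induction xs generalizing x with
  | nil => simp
  | cons a xs ih =>
    rw [lastD_cons]
    exact List.mem_cons_of_mem x (ih a)

theorem up_some (lines : List String) (n : Int) (k : Nat) :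
    ∀ (j : Int), j ≤ n → ∀ (t0 : Int) (b : Option Int),
    aAbove lines k j (some t0) b = (some (((wUp lines n k j).getLast?).getD t0), b) := by
  induction k with
  | zero => intro j _ t0 b; simp [aAbove, wUp]
  | succ k ih =>
    intro j hn t0 b
    rw [aAbove, wUp]
    by_cases h1 : 1 ≤ j
    · have hb : 1 ≤ j ∧ j ≤ n := ⟨h1, hn⟩
      rw [if_pos h1, if_pos hb]
      by_cases h2 : pvLineStripped lines j = ""
      · rw [if_pos h2, if_pos h2]; exact ih (j - 1) (by omega) t0 b
      · rw [if_neg h2, if_neg h2]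
        by_cases h3 : pvLineIsComment lines j = true
        · rw [if_pos h3, if_pos h3, lastD_cons]
          exact ih (j - 1) (by omega) j b
        · rw [if_neg h3, if_neg h3]; simp
    · have hb : ¬ (1 ≤ j ∧ j ≤ n) := by omega
      rw [if_neg h1, if_neg hb]; simp

theorem up_none (lines : List String) (n : Int) (k : Nat) :
    ∀ (j : Int), j ≤ n →
    aAbove lines k j none none = (match wUp lines n k j with
      | [] => (none, none)
      | x :: xs => (some ((xs.getLast?).getD x), some x)) := by
  induction k with
  | zero => intro j _; simp [aAbove, wUp]
  | succ k ih =>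
    intro j hn
    rw [aAbove, wUp]
    by_cases h1 : 1 ≤ j
    · have hb : 1 ≤ j ∧ j ≤ n := ⟨h1, hn⟩
      rw [if_pos h1, if_pos hb]
      by_cases h2 : pvLineStripped lines j = ""
      · rw [if_pos h2, if_pos h2]; exact ih (j - 1) (by omega)
      · rw [if_neg h2, if_neg h2]
        by_cases h3 : pvLineIsComment lines j = true
        · rw [if_pos h3, if_pos h3, up_some lines n k (j - 1) (by omega) j (some j)]
        · rw [if_neg h3, if_neg h3]
    · have hb : ¬ (1 ≤ j ∧ j ≤ n) := by omega
      rw [if_neg h1, if_neg hb]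

theorem down_some (lines : List String) (n : Int) (k : Nat) :
    ∀ (j : Int), 1 ≤ j → ∀ (t0 b0 : Int),
    aBelow lines n k j (some t0) (some b0) = (some t0, some (((wDown lines n k j).getLast?).getD b0)) := by
  induction k with
  | zero => intro j _ t0 b0; simp [aBelow, wDown]
  | succ k ih =>
    intro j hj t0 b0
    rw [aBelow, wDown]
    by_cases h1 : j ≤ n
    · have hb : 1 ≤ j ∧ j ≤ n := ⟨hj, h1⟩
      rw [if_pos h1, if_pos hb]
      by_cases h2 : pvLineStripped lines j = ""
      · rw [if_pos h2, if_pos h2]; exact ih (j + 1) (by omega) t0 b0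
      · rw [if_neg h2, if_neg h2]
        by_cases h3 : pvLineIsComment lines j = true
        · rw [if_pos h3, if_pos h3, lastD_cons]
          exact ih (j + 1) (by omega) t0 j
        · rw [if_neg h3, if_neg h3]; simp
    · have hb : ¬ (1 ≤ j ∧ j ≤ n) := by omega
      rw [if_neg h1, if_neg hb]; simp

theorem down_none (lines : List String) (n : Int) (k : Nat) :
    ∀ (j : Int), 1 ≤ j →
    aBelow lines n k j none none = (match wDown lines n k j with
      | [] => (none, none)
      | x :: xs => (some x, some ((xs.getLast?).getD x))) := by
  induction k with
  | zero => intro j _; simp [aBelow, wDown]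
  | succ k ih =>
    intro j hj
    rw [aBelow, wDown]
    by_cases h1 : j ≤ n
    · have hb : 1 ≤ j ∧ j ≤ n := ⟨hj, h1⟩
      rw [if_pos h1, if_pos hb]
      by_cases h2 : pvLineStripped lines j = ""
      · rw [if_pos h2, if_pos h2]; exact ih (j + 1) (by omega)
      · rw [if_neg h2, if_neg h2]
        by_cases h3 : pvLineIsComment lines j = true
        · rw [if_pos h3, if_pos h3, down_some lines n k (j + 1) (by omega) j j]
        · rw [if_neg h3, if_neg h3]
    · have hb : ¬ (1 ≤ j ∧ j ≤ n) := by omega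
      rw [if_neg h1, if_neg hb]

theorem up_le (lines : List String) (n : Int) (k : Nat) :
    ∀ (j : Int), ∀ x ∈ wUp lines n k j, x ≤ j := by
  induction k with
  | zero => intro j x hx; simp [wUp] at hx
  | succ k ih =>
    intro j x hx
    rw [wUp] at hx
    by_cases h1 : 1 ≤ j ∧ j ≤ n
    · rw [if_pos h1] at hx
      by_cases h2 : pvLineStripped lines j = ""
      · rw [if_pos h2] at hx; have := ih (j - 1) x hx; omega
      · rw [if_neg h2] at hx
        by_cases h3 : pvLineIsComment lines j = true
        · rw [if_pos h3] at hx
          rcases List.mem_cons.mp hx with rfl | hx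
          · omega
          · have := ih (j - 1) x hx; omega
        · rw [if_neg h3] at hx; cases hx
    · rw [if_neg h1] at hx; cases hx

theorem down_ge (lines : List String) (n : Int) (k : Nat) :
    ∀ (j : Int), ∀ x ∈ wDown lines n k j, j ≤ x := by
  induction k with
  | zero => intro j x hx; simp [wDown] at hx
  | succ k ih =>
    intro j x hx
    rw [wDown] at hx
    by_cases h1 : 1 ≤ j ∧ j ≤ n
    · rw [if_pos h1] at hx
      by_cases h2 : pvLineStripped lines j = ""
      · rw [if_pos h2] at hx; have := ih (j + 1) x hx; omega
      · rw [if_neg h2] at hx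
        by_cases h3 : pvLineIsComment lines j = true
        · rw [if_pos h3] at hx
          rcases List.mem_cons.mp hx with rfl | hx
          · omega
          · have := ih (j + 1) x hx; omega
        · rw [if_neg h3] at hx; cases hx
    · rw [if_neg h1] at hx; cases hx

theorem up_pair (lines : List String) (n : Int) (k : Nat) :
    ∀ (j : Int), (wUp lines n k j).Pairwise (· > ·) := by
  induction k with
  | zero => intro j; simp [wUp]
  | succ k ih =>
    intro j
    rw [wUp]
    by_cases h1 : 1 ≤ j ∧ j ≤ n
    · rw [if_pos h1]
      by_cases h2 : pvLineStripped lines j = ""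
      · rw [if_pos h2]; exact ih (j - 1)
      · rw [if_neg h2]
        by_cases h3 : pvLineIsComment lines j = true
        · rw [if_pos h3]
          refine List.pairwise_cons.mpr ⟨?_, ih (j - 1)⟩
          intro y hy
          have := up_le lines n k (j - 1) y hy; omega
        · rw [if_neg h3]; simp
    · rw [if_neg h1]; simp

theorem down_pair (lines : List String) (n : Int) (k : Nat) :
    ∀ (j : Int), (wDown lines n k j).Pairwise (· < ·) := by
  induction k with
  | zero => intro j; simp [wDown]
  | succ k ih =>
    intro j
    rw [wDown]
    by_cases h1 : 1 ≤ j ∧ j ≤ n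
    · rw [if_pos h1]
      by_cases h2 : pvLineStripped lines j = ""
      · rw [if_pos h2]; exact ih (j + 1)
      · rw [if_neg h2]
        by_cases h3 : pvLineIsComment lines j = true
        · rw [if_pos h3]
          refine List.pairwise_cons.mpr ⟨?_, ih (j + 1)⟩
          intro y hy
          have := down_ge lines n k (j + 1) y hy; omega
        · rw [if_neg h3]; simp
    · rw [if_neg h1]; simp

theorem desc_lastD_le (x : Int) (xs : List Int) (hp : (x :: xs).Pairwise (· > ·)) :
    ∀ y ∈ x :: xs, (xs.getLast?).getD x ≤ y := by
  induction xs generalizing x with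
  | nil => intro y hy; simp at hy; subst hy; simp
  | cons a xs ih =>
    intro y hy
    rw [lastD_cons]
    have hxa : x > a := List.rel_of_pairwise_cons hp (by simp)
    have h2 := ih a (List.pairwise_cons.mp hp).2
    rcases List.mem_cons.mp hy with rfl | hy
    · have := h2 a (by simp); omega
    · exact h2 y hy

theorem asc_le_lastD (x : Int) (xs : List Int) (hp : (x :: xs).Pairwise (· < ·)) :
    ∀ y ∈ x :: xs, y ≤ (xs.getLast?).getD x := by
  induction xs generalizing x with
  | nil => intro y hy; simp at hy; subst hy; simp
  | cons a xs ih =>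
    intro y hy
    rw [lastD_cons]
    have hxa : x < a := List.rel_of_pairwise_cons hp (by simp)
    have h2 := ih a (List.pairwise_cons.mp hp).2
    rcases List.mem_cons.mp hy with rfl | hy
    · have := h2 a (by simp); omega
    · exact h2 y hy

theorem foldl_min_eq (l : List Int) : ∀ (x m : Int), (m = x ∨ m ∈ l) → m ≤ x →
    (∀ y ∈ l, m ≤ y) → l.foldl min x = m := by
  induction l with
  | nil =>
    intro x m hm _ _
    rcases hm with rfl | hm
    · rfl
    · cases hm
  | cons a l ih =>
    intro x m hm hx hl
    have ha : m ≤ a := hl a (by simp)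
    refine ih (min x a) m ?_ (le_min hx ha) (fun y hy => hl y (by simp [hy]))
    rcases hm with rfl | hm
    · left; exact (min_eq_left ha).symm
    · rcases List.mem_cons.mp hm with rfl | hm
      · left; exact (min_eq_right hx).symm
      · right; exact hm

theorem foldl_max_eq (l : List Int) : ∀ (x m : Int), (m = x ∨ m ∈ l) → x ≤ m →
    (∀ y ∈ l, y ≤ m) → l.foldl max x = m := by
  induction l with
  | nil =>
    intro x m hm _ _
    rcases hm with rfl | hm
    · rfl
    · cases hm
  | cons a l ih =>
    intro x m hm hx hl
    have ha : a ≤ m := hl a (by simp)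
    refine ih (max x a) m ?_ (max_le hx ha) (fun y hy => hl y (by simp [hy]))
    rcases hm with rfl | hm
    · left; exact (max_eq_left ha).symm
    · rcases List.mem_cons.mp hm with rfl | hm
      · left; exact (max_eq_right hx).symm
      · right; exact hm

-- A equals the min/max-over-walk-lists reformulation
theorem A_eq_walkSpan (lines : List String) (comment_line : Int) :
    python_comment_block_span_py lines comment_line = walkSpan lines comment_line := by
  by_cases hr : comment_line ≤ 0 ∨ (lines.length : Int) < comment_line
  · simp only [python_comment_block_span_py, walkSpan, if_pos hr]
  · push Not at hr
    obtain ⟨hc1, hc2⟩ := hr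
    have hr' : ¬ (comment_line ≤ 0 ∨ (lines.length : Int) < comment_line) := by omega
    simp only [python_comment_block_span_py, walkSpan, if_neg hr']
    set n : Int := (lines.length : Int) with hn
    set be : Int := (aFindEnd lines n (n + 1 - comment_line).toNat comment_line).getD comment_line with hbe
    have hbe_ge : comment_line ≤ be := by
      rcases h : aFindEnd lines n (n + 1 - comment_line).toNat comment_line with _ | r
      · rw [hbe, h]; simp
      · have := findEnd_ge lines n _ _ _ h
        rw [hbe, h]; simpa using this
    have hu_le := up_le lines n (comment_line - 1).toNat (comment_line - 1)
    have hd_ge := down_ge lines n (n + 1 - (be + 1)).toNat (be + 1)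
    have hu_pair := up_pair lines n (comment_line - 1).toNat (comment_line - 1)
    have hd_pair := down_pair lines n (n + 1 - (be + 1)).toNat (be + 1)
    rw [up_none lines n (comment_line - 1).toNat (comment_line - 1) (by omega)]
    rcases hu : wUp lines n (comment_line - 1).toNat (comment_line - 1) with _ | ⟨x, xs⟩
    · dsimp only
      rw [down_none lines n (n + 1 - (be + 1)).toNat (be + 1) (by omega)]
      rcases hd : wDown lines n (n + 1 - (be + 1)).toNat (be + 1) with _ | ⟨y, ys⟩
      · rfl
      · dsimp only
        rw [hd] at hd_pair hd_ge
        simp only [List.nil_append, PySem.List.min?_id_cons, PySem.List.max?_id_cons]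
        have h1 : ys.foldl min y = y :=
          foldl_min_eq ys y y (Or.inl rfl) le_rfl
            (fun z hz => le_of_lt (List.rel_of_pairwise_cons hd_pair hz))
        have h2 : ys.foldl max y = (ys.getLast?).getD y := by
          refine foldl_max_eq ys y _ ?_ ?_ ?_
          · rcases List.mem_cons.mp (lastD_mem y ys) with h | h
            · left; omega
            · right; exact h
          · exact asc_le_lastD y ys hd_pair y (by simp)
          · exact fun z hz => asc_le_lastD y ys hd_pair z (by simp [hz])
        rw [h1, h2]
        rfl
    · rw [hu] at hu_pair hu_le
      have hM := List.mem_cons.mp (lastD_mem x xs)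
      have hM_le : ∀ y ∈ x :: xs, ((xs.getLast?).getD x) ≤ y := desc_lastD_le x xs hu_pair
      have hM_ub : ((xs.getLast?).getD x) ≤ comment_line - 1 := hu_le _ (lastD_mem x xs)
      have hx_ub : x ≤ comment_line - 1 := hu_le x (by simp)
      show (match (aBelow lines n (n + 1 - (be + 1)).toNat (be + 1) (some ((xs.getLast?).getD x)) (some x)).1 with
        | none => none
        | some t => some (t, (aBelow lines n (n + 1 - (be + 1)).toNat (be + 1) (some ((xs.getLast?).getD x)) (some x)).2.getD t)) = _
      rw [down_some lines n (n + 1 - (be + 1)).toNat (be + 1) (by omega) ((xs.getLast?).getD x) x]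
      simp only [List.cons_append, PySem.List.min?_id_cons, PySem.List.max?_id_cons]
      set d : List Int := wDown lines n (n + 1 - (be + 1)).toNat (be + 1) with hd
      have hmin : (xs ++ d).foldl min x = ((xs.getLast?).getD x) := by
        refine foldl_min_eq (xs ++ d) x _ ?_ (hM_le x (by simp)) ?_
        · rcases hM with h | h
          · left; exact h
          · right; exact List.mem_append_left d h
        · intro y hy
          rcases List.mem_append.mp hy with h | h
          · exact hM_le y (by simp [h])
          · have := hd_ge y h; omega
      have hmax : (xs ++ d).foldl max x = ((d.getLast?).getD x) := by
        rcases hdc : d with _ | ⟨y, ys⟩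
        · simp only [List.append_nil]
          refine foldl_max_eq xs x x (Or.inl rfl) le_rfl ?_
          intro z hz
          exact le_of_lt (List.rel_of_pairwise_cons hu_pair hz)
        · rw [lastD_cons]
          rw [hdc] at hd_pair hd_ge
          have hN_mem : ((ys.getLast?).getD y) ∈ y :: ys := lastD_mem y ys
          have hN_ge : ∀ z ∈ y :: ys, z ≤ ((ys.getLast?).getD y) := asc_le_lastD y ys hd_pair
          have hN_lb : be + 1 ≤ ((ys.getLast?).getD y) := hd_ge _ hN_mem
          refine foldl_max_eq (xs ++ y :: ys) x _ ?_ (by omega) ?_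
          · right; exact List.mem_append_right xs hN_mem
          · intro z hz
            rcases List.mem_append.mp hz with h | h
            · have h1 : x > z := List.rel_of_pairwise_cons hu_pair h
              omega
            · exact hN_ge z h
      rw [hmin, hmax]
      rfl

-- the fuel loop finding the metadata end equals find? over the Python range
theorem findEnd_eq_find? (lines : List String) (n : Int) (k : Nat) :
    ∀ (j : Int), n + 1 - j ≤ (k : Int) →
    aFindEnd lines n k j =
      (PySem.List.pyRange j (n + 1) 1).find? (fun i => PySem.Str.isIn "]" (pvBody lines i)) := by
  induction k with
  | zero =>
    intro j hk
    rw [aFindEnd, PySem.List.pyRange_one_eq_nil (by omega)]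
    rfl
  | succ k ih =>
    intro j hk
    rw [aFindEnd]
    by_cases hj : j ≤ n
    · rw [if_pos hj, PySem.List.pyRange_one_cons (by omega), List.find?_cons]
      by_cases hIn : PySem.Str.isIn "]" (pvBody lines j) = true
      · rw [if_pos (by simpa [pvBody] using hIn)]
        have hC : PySem.Chars.isIn [']'] (pvBody lines j).toList = true := by simpa using hIn
        simp [hC]
      · rw [if_neg (by simpa [pvBody] using hIn)]
        rw [ih (j + 1) (by omega)]
        have hC : PySem.Chars.isIn [']'] (pvBody lines j).toList = false := by
          simpa using hIn
        simp [hC]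
    · rw [if_neg hj, PySem.List.pyRange_one_eq_nil (by omega)]
      rfl

-- membership in the ABOVE walk's collected list, in terms of the stop boundary s
theorem wUp_mem (lines : List String) (n : Int) (k : Nat) :
    ∀ (j s : Int), j ≤ (k : Int) → j ≤ n →
    (s = 0 ∨ (1 ≤ s ∧ s ≤ j ∧ pvPassable lines s = false)) →
    (∀ y, s < y → y ≤ j → pvPassable lines y = true) →
    ∀ x, (x ∈ wUp lines n k j ↔ (pvLineIsComment lines x = true ∧ s < x ∧ x ≤ j)) := by
  induction k with
  | zero =>
    intro j s hk _ hs _ x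
    rw [wUp]
    have hs0 : s = 0 := by rcases hs with h | h; exact h; omega
    constructor
    · intro h; cases h
    · intro ⟨_, h1, h2⟩; omega
  | succ k ih =>
    intro j s hk hn hs hpass x
    rw [wUp]
    by_cases h1 : 1 ≤ j ∧ j ≤ n
    · rw [if_pos h1]
      by_cases h2 : pvLineStripped lines j = ""
      · rw [if_pos h2]
        have hpj : pvPassable lines j = true := by simp [pvPassable, h2]
        have hsj : s ≤ j - 1 := by
          rcases hs with h | ⟨hh1, hh2, hh3⟩
          · omega
          · by_cases hsjj : s = j
            · rw [hsjj] at hh3; rw [hh3] at hpj; cases hpj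
            · omega
        rw [ih (j - 1) s (by omega) (by omega)
            (by rcases hs with h | h; exact Or.inl h; exact Or.inr ⟨h.1, by omega, h.2.2⟩)
            (fun y hy1 hy2 => hpass y hy1 (by omega)) x]
        have hcj : pvLineIsComment lines j = false := by
          simp only [pvLineIsComment, h2]
          decide
        constructor
        · rintro ⟨ha, hb, hc⟩; exact ⟨ha, hb, by omega⟩
        · rintro ⟨ha, hb, hc⟩
          refine ⟨ha, hb, ?_⟩
          by_cases hxj : x = j
          · rw [hxj] at ha; rw [ha] at hcj; cases hcj
          · omega
      · rw [if_neg h2]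
        by_cases h3 : pvLineIsComment lines j = true
        · rw [if_pos h3]
          have hpj : pvPassable lines j = true := by simp [pvPassable, h3]
          have hsj : s ≤ j - 1 := by
            rcases hs with h | ⟨hh1, hh2, hh3⟩
            · omega
            · by_cases hsjj : s = j
              · rw [hsjj] at hh3; rw [hh3] at hpj; cases hpj
              · omega
          rw [List.mem_cons, ih (j - 1) s (by omega) (by omega)
              (by rcases hs with h | h; exact Or.inl h; exact Or.inr ⟨h.1, by omega, h.2.2⟩)
              (fun y hy1 hy2 => hpass y hy1 (by omega)) x]
          constructor
          · rintro (hxe | ⟨ha, hb, hc⟩)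
            · exact ⟨by rw [hxe]; exact h3, by omega, by omega⟩
            · exact ⟨ha, hb, by omega⟩
          · rintro ⟨ha, hb, hc⟩
            by_cases hxj : x = j
            · exact Or.inl hxj
            · exact Or.inr ⟨ha, hb, by omega⟩
        · rw [if_neg h3]
          have hpj : pvPassable lines j = false := by
            simp [pvPassable]
            exact ⟨by simpa using h2, by simpa using h3⟩
          have hsj : s = j := by
            by_cases hlt : s < j
            · have := hpass j hlt (le_refl j)
              rw [this] at hpj; cases hpj
            · rcases hs with h | h
              · omega
              · omega
          constructor
          · intro h; cases h
          · rintro ⟨_, hb, hc⟩; omega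
    · rw [if_neg h1]
      have hj0 : j ≤ 0 := by omega
      have hs0 : s = 0 := by rcases hs with h | h; exact h; omega
      constructor
      · intro h; cases h
      · rintro ⟨_, hb, hc⟩; omega

-- membership in the BELOW walk's collected list, in terms of the stop boundary s
theorem wDown_mem (lines : List String) (n : Int) (k : Nat) :
    ∀ (j s : Int), n + 1 - j ≤ (k : Int) → 1 ≤ j →
    (s = n + 1 ∨ (j ≤ s ∧ s ≤ n ∧ pvPassable lines s = false)) →
    (∀ y, j ≤ y → y < s → pvPassable lines y = true) →
    ∀ x, (x ∈ wDown lines n k j ↔ (pvLineIsComment lines x = true ∧ j ≤ x ∧ x < s)) := by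
  induction k with
  | zero =>
    intro j s hk hj hs _ x
    rw [wDown]
    have hsn : s ≤ n + 1 := by rcases hs with h | h; omega; omega
    constructor
    · intro h; cases h
    · rintro ⟨_, h1, h2⟩; omega
  | succ k ih =>
    intro j s hk hj hs hpass x
    rw [wDown]
    by_cases h1 : j ≤ n
    · rw [if_pos ⟨hj, h1⟩]
      by_cases h2 : pvLineStripped lines j = ""
      · rw [if_pos h2]
        have hpj : pvPassable lines j = true := by simp [pvPassable, h2]
        have hsj : j + 1 ≤ s := by
          rcases hs with h | ⟨hh1, hh2, hh3⟩
          · omega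
          · by_cases hsjj : s = j
            · rw [hsjj] at hh3; rw [hh3] at hpj; cases hpj
            · omega
        rw [ih (j + 1) s (by omega) (by omega)
            (by rcases hs with h | h; exact Or.inl h; exact Or.inr ⟨by omega, h.2.1, h.2.2⟩)
            (fun y hy1 hy2 => hpass y (by omega) hy2) x]
        have hcj : pvLineIsComment lines j = false := by
          simp only [pvLineIsComment, h2]
          decide
        constructor
        · rintro ⟨ha, hb, hc⟩; exact ⟨ha, by omega, hc⟩
        · rintro ⟨ha, hb, hc⟩
          refine ⟨ha, ?_, hc⟩
          by_cases hxj : x = j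
          · rw [hxj] at ha; rw [ha] at hcj; cases hcj
          · omega
      · rw [if_neg h2]
        by_cases h3 : pvLineIsComment lines j = true
        · rw [if_pos h3]
          have hpj : pvPassable lines j = true := by simp [pvPassable, h3]
          have hsj : j + 1 ≤ s := by
            rcases hs with h | ⟨hh1, hh2, hh3⟩
            · omega
            · by_cases hsjj : s = j
              · rw [hsjj] at hh3; rw [hh3] at hpj; cases hpj
              · omega
          rw [List.mem_cons, ih (j + 1) s (by omega) (by omega)
              (by rcases hs with h | h; exact Or.inl h; exact Or.inr ⟨by omega, h.2.1, h.2.2⟩)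
              (fun y hy1 hy2 => hpass y (by omega) hy2) x]
          constructor
          · rintro (hxe | ⟨ha, hb, hc⟩)
            · exact ⟨by rw [hxe]; exact h3, by omega, by omega⟩
            · exact ⟨ha, by omega, hc⟩
          · rintro ⟨ha, hb, hc⟩
            by_cases hxj : x = j
            · exact Or.inl hxj
            · exact Or.inr ⟨ha, by omega, hc⟩
        · rw [if_neg h3]
          have hpj : pvPassable lines j = false := by
            simp [pvPassable]
            exact ⟨by simpa using h2, by simpa using h3⟩
          have hsj : s = j := by
            by_cases hlt : j < s
            · have := hpass j (le_refl j) hlt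
              rw [this] at hpj; cases hpj
            · rcases hs with h | h
              · omega
              · omega
          constructor
          · intro h; cases h
          · rintro ⟨_, hb, hc⟩; omega
    · rw [if_neg (by omega : ¬ (1 ≤ j ∧ j ≤ n))]
      have hsn : s ≤ n + 1 := by rcases hs with h | h; omega; omega
      constructor
      · intro h; cases h
      · rintro ⟨_, hb, hc⟩; omega

-- min?/max? over identity depend only on membership
theorem min?_ext (L1 L2 : List Int) (h : ∀ x, x ∈ L1 ↔ x ∈ L2) :
    PySem.List.min? L1 (fun x => x) = PySem.List.min? L2 (fun x => x) := by
  cases L1 with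
  | nil =>
    cases L2 with
    | nil => rfl
    | cons y t => exact absurd ((h y).mpr (by simp)) (by simp)
  | cons a s =>
    have hm : PySem.List.min? (a :: s) (fun x => x) = some (s.foldl min a) :=
      PySem.List.min?_id_cons a s
    have hmem : s.foldl min a ∈ a :: s := PySem.List.min?_mem hm
    have hlb : ∀ y ∈ a :: s, s.foldl min a ≤ y := fun y hy => PySem.List.min?_isMin hm y hy
    have hmem2 := (h _).mp hmem
    cases L2 with
    | nil => simp at hmem2
    | cons b t =>
      rw [hm, PySem.List.min?_id_cons]
      congr 1
      refine Eq.symm (foldl_min_eq t b _ ?_ (hlb b ((h b).mpr (by simp))) ?_)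
      · rcases List.mem_cons.mp hmem2 with hh | hh
        · exact Or.inl hh
        · exact Or.inr hh
      · intro y hy
        exact hlb y ((h y).mpr (by simp [hy]))

theorem max?_ext (L1 L2 : List Int) (h : ∀ x, x ∈ L1 ↔ x ∈ L2) :
    PySem.List.max? L1 (fun x => x) = PySem.List.max? L2 (fun x => x) := by
  cases L1 with
  | nil =>
    cases L2 with
    | nil => rfl
    | cons y t => exact absurd ((h y).mpr (by simp)) (by simp)
  | cons a s =>
    have hm : PySem.List.max? (a :: s) (fun x => x) = some (s.foldl max a) :=
      PySem.List.max?_id_cons a s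
    have hmem : s.foldl max a ∈ a :: s := PySem.List.max?_mem hm
    have hub : ∀ y ∈ a :: s, y ≤ s.foldl max a := fun y hy => PySem.List.max?_isMax hm y hy
    have hmem2 := (h _).mp hmem
    cases L2 with
    | nil => simp at hmem2
    | cons b t =>
      rw [hm, PySem.List.max?_id_cons]
      congr 1
      refine Eq.symm (foldl_max_eq t b _ ?_ (hub b ((h b).mpr (by simp))) ?_)
      · rcases List.mem_cons.mp hmem2 with hh | hh
        · exact Or.inl hh
        · exact Or.inr hh
      · intro y hy
        exact hub y ((h y).mpr (by simp [hy]))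

-- the walk reformulation equals B
theorem walkSpan_eq_alt (lines : List String) (comment_line : Int) :
    walkSpan lines comment_line = python_comment_block_span_py_alt lines comment_line := by
  by_cases hr : comment_line ≤ 0 ∨ (lines.length : Int) < comment_line
  · simp only [walkSpan, python_comment_block_span_py_alt, if_pos hr]
  · push Not at hr
    obtain ⟨hc1, hc2⟩ := hr
    have hr' : ¬ (comment_line ≤ 0 ∨ (lines.length : Int) < comment_line) := by omega
    simp only [walkSpan, python_comment_block_span_py_alt, if_neg hr']
    set n : Int := (lines.length : Int) with hn
    rw [findEnd_eq_find? lines n (n + 1 - comment_line).toNat comment_line (by omega)]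
    set be : Int := ((PySem.List.pyRange comment_line (n + 1) 1).find?
      (fun i => PySem.Str.isIn "]" (pvBody lines i))).getD comment_line with hbe
    have hbe_ge : comment_line ≤ be := by
      rcases h : (PySem.List.pyRange comment_line (n + 1) 1).find?
          (fun i => PySem.Str.isIn "]" (pvBody lines i)) with _ | r
      · rw [hbe, h]; simp
      · have hrmem : r ∈ PySem.List.pyRange comment_line (n + 1) 1 := List.mem_of_find?_eq_some h
        have := (PySem.List.mem_pyRange_one.mp hrmem).1
        rw [hbe, h]; simpa using this
    -- the up stop boundary
    set sUp : Int := (PySem.List.max? ((PySem.List.pyRange 1 comment_line 1).filter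
      (fun j => !pvPassable lines j)) (fun x => x)).getD 0 with hsUp
    have hsUp_props : (sUp = 0 ∨ (1 ≤ sUp ∧ sUp ≤ comment_line - 1 ∧ pvPassable lines sUp = false)) ∧
        (∀ y, sUp < y → y ≤ comment_line - 1 → pvPassable lines y = true) := by
      rcases hmx : PySem.List.max? ((PySem.List.pyRange 1 comment_line 1).filter
          (fun j => !pvPassable lines j)) (fun x => x) with _ | m
      · have hnil := (PySem.List.max?_eq_none_iff _ _).mp hmx
        have hs0 : sUp = 0 := by rw [hsUp, hmx]; rfl
        constructor
        · left; exact hs0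
        · intro y hy1 hy2
          by_contra hyp
          have hyf : y ∈ (PySem.List.pyRange 1 comment_line 1).filter (fun j => !pvPassable lines j) := by
            rw [List.mem_filter]
            refine ⟨PySem.List.mem_pyRange_one.mpr ⟨by omega, by omega⟩, ?_⟩
            simp [Bool.not_eq_true] at hyp ⊢
            exact hyp
          rw [hnil] at hyf; cases hyf
      · have hgd : sUp = m := by rw [hsUp, hmx]; rfl
        have hmem := PySem.List.max?_mem hmx
        rw [List.mem_filter] at hmem
        obtain ⟨hmr, hmp⟩ := hmem
        have hmr' := PySem.List.mem_pyRange_one.mp hmr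
        constructor
        · right
          refine ⟨by omega, by omega, ?_⟩
          rw [hgd]
          simpa using hmp
        · intro y hy1 hy2
          by_contra hyp
          have hyf : y ∈ (PySem.List.pyRange 1 comment_line 1).filter (fun j => !pvPassable lines j) := by
            rw [List.mem_filter]
            refine ⟨PySem.List.mem_pyRange_one.mpr ⟨by omega, by omega⟩, ?_⟩
            simp [Bool.not_eq_true] at hyp ⊢
            exact hyp
          have := PySem.List.max?_isMax hmx y hyf
          simp at this
          omega
    -- the down stop boundary
    set sDown : Int := (PySem.List.min? ((PySem.List.pyRange (be + 1) (n + 1) 1).filter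
      (fun j => !pvPassable lines j)) (fun x => x)).getD (n + 1) with hsDown
    have hsDown_props : (sDown = n + 1 ∨ (be + 1 ≤ sDown ∧ sDown ≤ n ∧ pvPassable lines sDown = false)) ∧
        (∀ y, be + 1 ≤ y → y < sDown → pvPassable lines y = true) := by
      rcases hmn : PySem.List.min? ((PySem.List.pyRange (be + 1) (n + 1) 1).filter
          (fun j => !pvPassable lines j)) (fun x => x) with _ | m
      · have hnil := (PySem.List.min?_eq_none_iff _ _).mp hmn
        have hsd : sDown = (n + 1 : Int) := by rw [hsDown, hmn]; rfl
        constructor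
        · left; exact hsd
        · intro y hy1 hy2
          by_contra hyp
          have hyf : y ∈ (PySem.List.pyRange (be + 1) (n + 1) 1).filter (fun j => !pvPassable lines j) := by
            rw [List.mem_filter]
            refine ⟨PySem.List.mem_pyRange_one.mpr ⟨by omega, by omega⟩, ?_⟩
            simp [Bool.not_eq_true] at hyp ⊢
            exact hyp
          rw [hnil] at hyf; cases hyf
      · have hgd : sDown = m := by rw [hsDown, hmn]; rfl
        have hmem := PySem.List.min?_mem hmn
        rw [List.mem_filter] at hmem
        obtain ⟨hmr, hmp⟩ := hmem
        have hmr' := PySem.List.mem_pyRange_one.mp hmr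
        constructor
        · right
          refine ⟨by omega, by omega, ?_⟩
          rw [hgd]
          simpa using hmp
        · intro y hy1 hy2
          by_contra hyp
          have hyn : y < n + 1 := by
            rcases List.mem_filter.mp (PySem.List.min?_mem hmn) with ⟨hh, _⟩
            have := PySem.List.mem_pyRange_one.mp hh
            omega
          have hyf : y ∈ (PySem.List.pyRange (be + 1) (n + 1) 1).filter (fun j => !pvPassable lines j) := by
            rw [List.mem_filter]
            refine ⟨PySem.List.mem_pyRange_one.mpr ⟨by omega, by omega⟩, ?_⟩
            simp [Bool.not_eq_true] at hyp ⊢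
            exact hyp
          have := PySem.List.min?_isMin hmn y hyf
          simp at this
          omega
    -- membership equivalence between walk lists and B's filtered windows
    have hmemEq : ∀ x,
        x ∈ (wUp lines n (comment_line - 1).toNat (comment_line - 1) ++
          wDown lines n (n + 1 - (be + 1)).toNat (be + 1)) ↔
        x ∈ ((PySem.List.pyRange (sUp + 1) comment_line 1).filter (fun j => pvLineIsComment lines j)
          ++ (PySem.List.pyRange (be + 1) sDown 1).filter (fun j => pvLineIsComment lines j)) := by
      intro x
      rw [List.mem_append, List.mem_append]
      have hup := wUp_mem lines n (comment_line - 1).toNat (comment_line - 1) sUp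
        (Int.self_le_toNat _) (by omega) hsUp_props.1 hsUp_props.2 x
      have hdown := wDown_mem lines n (n + 1 - (be + 1)).toNat (be + 1) sDown
        (by omega) (by omega) hsDown_props.1 hsDown_props.2 x
      rw [hup, hdown, List.mem_filter, List.mem_filter,
        PySem.List.mem_pyRange_one, PySem.List.mem_pyRange_one]
      constructor
      · rintro (⟨ha, hb, hc⟩ | ⟨ha, hb, hc⟩)
        · exact Or.inl ⟨⟨by omega, by omega⟩, ha⟩
        · exact Or.inr ⟨⟨hb, hc⟩, ha⟩
      · rintro (⟨⟨ha, hb⟩, hc⟩ | ⟨⟨ha, hb⟩, hc⟩)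
        · exact Or.inl ⟨hc, by omega, by omega⟩
        · exact Or.inr ⟨hc, ha, hb⟩
    rw [min?_ext _ _ hmemEq, max?_ext _ _ hmemEq]

-- ===== VERDICT (by name: the statement is the Claim_ definition above) =====
theorem python_comment_block_span_py_spec : Claim_equal_python_comment_block_span_py := by
  intro lines comment_line _dom
  unfold Spec_python_comment_block_span_py
  rw [A_eq_walkSpan, walkSpan_eq_alt]
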